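-- pv_equiv track=rewrite | github.com/Syyysco/Zeven | modules/configure_shell.py | combine_ascii_numbers
-- ===== SOURCE A (Python) =====
-- def combine_ascii_numbers(number: int, char_sets: dict) -> tuple:
--     """
--     Combines multi-digit ASCII character tuples into a single tuple to represent the complete number.
--
--     :param number: Integer to be represented (eg. 101).
--     :param char_sets: Dictionary with ASCII tuples for each digit.
--     :return: A tuple with the lines combined to represent the entire number.
--     """
--     digits = str(number)
--     combined_lines = [""] * len(next(iter(char_sets.values())))  # Asume que todas las tuplas tienen la misma longitud
--
--     for digit in digits:
--         ascii_digit = char_sets[int(digit)]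
--         # Combine lines with two spaces separating them
--         for i, line in enumerate(ascii_digit):
--             combined_lines[i] += line + "  "
--
--     # Delete the two spaces to the right of the last digit
--     combined_lines = tuple(line[:-2] for line in combined_lines)
--
--     return combined_lines
-- ===== SOURCE B (Python) =====
-- def combine_ascii_numbers(number: int, char_sets: dict) -> tuple:
--     """Line-outer rebuild: pick each digit's tuple once, then join the i-th
--     lines of all digits with a two-space separator."""
--     height = len(next(iter(char_sets.values())))
--     digit_tuples = [char_sets[int(d)] for d in str(number)]
--     return tuple("  ".join(t[i] for t in digit_tuples) for i in range(height))
-- ===== Notes on version B (the rewrite author's own statement) =====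
-- stated objective: idiomatic
-- what changed: Transposed the loop nesting: instead of accumulating digit-by-digit into mutable line buffers and trimming the trailing separator, B collects each digit's tuple once and builds each output line directly with ' '.join over the digits.
-- outside the precondition, e.g. on combine_ascii_numbers(0, {5: ('x', 'y'), 0: ('a',)}): A returns ('a', ''), B raises IndexError
import Mathlib
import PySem

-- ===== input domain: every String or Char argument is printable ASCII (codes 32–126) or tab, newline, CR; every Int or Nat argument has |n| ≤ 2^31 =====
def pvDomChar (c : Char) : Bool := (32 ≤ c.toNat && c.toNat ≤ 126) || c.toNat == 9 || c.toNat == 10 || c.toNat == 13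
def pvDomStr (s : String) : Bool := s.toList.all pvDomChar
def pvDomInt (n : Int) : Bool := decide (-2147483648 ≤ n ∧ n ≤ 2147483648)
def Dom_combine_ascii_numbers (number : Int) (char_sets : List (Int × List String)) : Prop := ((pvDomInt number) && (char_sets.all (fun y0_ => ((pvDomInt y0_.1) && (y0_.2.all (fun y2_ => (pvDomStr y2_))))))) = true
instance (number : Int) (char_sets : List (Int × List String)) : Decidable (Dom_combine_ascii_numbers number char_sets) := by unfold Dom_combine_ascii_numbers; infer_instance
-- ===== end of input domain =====

-- B rebuilds the picture line-outer (for each output line, join the digits' i-th lines with "  ")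
-- instead of A's digit-outer accumulation into line buffers followed by trimming the trailing separator.

-- ===== PORT A =====
def combine_ascii_numbers (number : Int) (char_sets : List (Int × List String)) : List String :=
  let digits := PySem.Int.toChars number
  let combined_lines₀ :=
    List.replicate (((PySem.Dict.ofList char_sets).values.headD []).length) ""
  let combined_lines :=
    digits.foldl (fun acc digit =>
      let ascii_digit := ((PySem.Dict.ofList char_sets).get? ((digit.toNat : Int) - 48)).getD []
      (PySem.List.enumerate ascii_digit).foldl
        (fun acc2 p => PySem.List.pySetD acc2 p.1 (PySem.List.pyGetD acc2 p.1 "" ++ p.2 ++ "  ")) acc)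
      combined_lines₀
  combined_lines.map (fun line => PySem.Str.slice line none (some (-2)))

-- ===== PORT B =====
def combine_ascii_numbers_alt (number : Int) (char_sets : List (Int × List String)) : List String :=
  let height : Int := ((PySem.Dict.ofList char_sets).values.headD []).length
  let digit_tuples := (PySem.Int.toChars number).map
      (fun d => ((PySem.Dict.ofList char_sets).get? ((d.toNat : Int) - 48)).getD [])
  (PySem.List.pyRange 0 height 1).map (fun i =>
    PySem.Str.join "  " (digit_tuples.map (fun t => PySem.List.pyGetD t i "")))

-- ===== PRECONDITION & SPEC =====
-- Pre_ excludes: negative numbers (int('-') raises ValueError), empty char_sets (StopIteration),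
-- digits missing from char_sets (KeyError), and digit tuples whose length differs from the first
-- value's length — if longer A raises IndexError, and if shorter A returns a silently truncated
-- picture while B's index-based join raises IndexError there.
def Pre_combine_ascii_numbers (number : Int) (char_sets : List (Int × List String)) : Prop :=
  0 ≤ number ∧ char_sets ≠ [] ∧
  ((PySem.Int.toChars number).all (fun c =>
    ((PySem.Dict.ofList char_sets).get? ((c.toNat : Int) - 48)).map List.length
      == some (((PySem.Dict.ofList char_sets).values.headD []).length))) = true

instance (number : Int) (char_sets : List (Int × List String)) : Decidable (Pre_combine_ascii_numbers number char_sets) := by unfold Pre_combine_ascii_numbers; infer_instance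

def pvWitness_combine_ascii_numbers : Int × (List (Int × List String)) :=
  (10, [(0, ["a", "b"]), (1, ["c", "d"])])

def Spec_combine_ascii_numbers (number : Int) (char_sets : List (Int × List String)) (out : List String) : Prop := out = combine_ascii_numbers_alt number char_sets
instance (number : Int) (char_sets : List (Int × List String)) (out : List String) : Decidable (Spec_combine_ascii_numbers number char_sets out) := by unfold Spec_combine_ascii_numbers; infer_instance

-- ===== CLAIM (what is proved, stated in full; the proofs are below) =====
def Claim_equal_combine_ascii_numbers : Prop := ∀ (number : Int) (char_sets : List (Int × List String)), Dom_combine_ascii_numbers number char_sets → Pre_combine_ascii_numbers number char_sets → Spec_combine_ascii_numbers number char_sets (combine_ascii_numbers number char_sets)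

-- ===== LEMMAS AND PROOFS =====

-- `str(n)` is never empty
theorem pvToDigitsCore_ne_nil (f : Nat) : ∀ (n : Nat) (l : List Char), l ≠ [] → Nat.toDigitsCore 10 f n l ≠ [] := by
  induction f with
  | zero => intro n l h; simpa [Nat.toDigitsCore] using h
  | succ f ih =>
    intro n l h
    simp only [Nat.toDigitsCore]
    split
    · simp
    · exact ih _ _ (by simp)

theorem pvToChars_ne_nil (n : Int) : PySem.Int.toChars n ≠ [] := by
  unfold PySem.Int.toChars
  split
  · simp
  · show Nat.toDigitsCore 10 (n.toNat + 1) n.toNat [] ≠ []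
    simp only [Nat.toDigitsCore]
    split
    · simp
    · exact pvToDigitsCore_ne_nil _ _ _ (by simp)

-- one update of A's inner loop, and the string appended to one line buffer
def pvStep (acc2 : List String) (p : Int × String) : List String :=
  PySem.List.pySetD acc2 p.1 (PySem.List.pyGetD acc2 p.1 "" ++ p.2 ++ "  ")

def pvG (a b : String) : String := a ++ b ++ "  "

-- A's inner `for i, line in enumerate(ascii_digit)` loop is a zipWith when the lengths agree
theorem pvInner_eq_zipWith (t : List String) : ∀ (s : Nat) (acc : List String), s + t.length = acc.length →
    (PySem.List.enumerate t (s : Int)).foldl pvStep acc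
    = acc.take s ++ List.zipWith pvG (acc.drop s) t := by
  induction t with
  | nil =>
    intro s acc hlen
    simp only [List.length_nil, Nat.add_zero] at hlen
    simp [PySem.List.enumerate_nil, List.take_of_length_le (Nat.le_of_eq hlen.symm),
      List.drop_of_length_le (Nat.le_of_eq hlen.symm)]
  | cons x rest ih =>
    intro s acc hlen
    have hs : s < acc.length := by simp at hlen; omega
    have htake : (acc.take s).length = s := by simp; omega
    rw [PySem.List.enumerate_cons, List.foldl_cons]
    have hv : pvStep acc ((s : Int), x) = acc.set s (acc.getD s "" ++ x ++ "  ") := by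
      simp [pvStep, PySem.List.pySetD_natCast, PySem.List.pyGetD_natCast]
    have hcast : (s : Int) + 1 = ((s + 1 : Nat) : Int) := by push_cast; ring
    rw [hv, hcast, ih (s + 1) _ (by simp at hlen ⊢; omega)]
    have hset : acc.set s (acc.getD s "" ++ x ++ "  ")
        = acc.take s ++ (acc.getD s "" ++ x ++ "  ") :: acc.drop (s + 1) := by
      rw [List.set_eq_take_append_cons_drop, if_pos hs]
    have h1 : (acc.set s (acc.getD s "" ++ x ++ "  ")).take (s + 1)
        = acc.take s ++ [acc.getD s "" ++ x ++ "  "] := by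
      rw [hset, List.take_append, List.take_of_length_le (by omega), htake,
        Nat.add_sub_cancel_left]
      simp
    have h2 : (acc.set s (acc.getD s "" ++ x ++ "  ")).drop (s + 1) = acc.drop (s + 1) := by
      rw [hset, List.drop_append, List.drop_eq_nil_of_le (by omega), htake,
        Nat.add_sub_cancel_left]
      simp
    have h3 : acc.drop s = acc[s] :: acc.drop (s + 1) := List.drop_eq_getElem_cons hs
    have h4 : acc.getD s "" ++ x ++ "  " = pvG acc[s] x := by
      rw [List.getD_eq_getElem _ _ hs]; simp [pvG]
    rw [h1, h2, h3, h4, List.zipWith_cons_cons]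
    simp

-- folding zipWith pvG keeps the length …
theorem pvOuter_len : ∀ (ts : List (List String)) (init : List String),
    (∀ t ∈ ts, t.length = init.length) →
    (ts.foldl (fun acc t => List.zipWith pvG acc t) init).length = init.length := by
  intro ts
  induction ts with
  | nil => intro init _; rfl
  | cons t rest ih =>
    intro init hlen
    have h1 : (List.zipWith pvG init t).length = init.length := by
      simp [hlen t (by simp)]
    rw [List.foldl_cons, ih _ (by intro u hu; rw [h1]; exact hlen u (by simp [hu])), h1]

-- … and acts independently on each line
theorem pvOuter_get : ∀ (ts : List (List String)) (init : List String) (i : Nat),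
    (∀ t ∈ ts, t.length = init.length) → i < init.length →
    (ts.foldl (fun acc t => List.zipWith pvG acc t) init).getD i ""
      = ts.foldl (fun a t => a ++ t.getD i "" ++ "  ") (init.getD i "") := by
  intro ts
  induction ts with
  | nil => intro init i _ _; rfl
  | cons t rest ih =>
    intro init i hlen hi
    have ht : t.length = init.length := hlen t (by simp)
    have h1 : (List.zipWith pvG init t).length = init.length := by simp [ht]
    have hzip : (List.zipWith pvG init t).getD i "" = init.getD i "" ++ t.getD i "" ++ "  " := by
      rw [List.getD_eq_getElem _ _ (h1 ▸ hi), List.getD_eq_getElem _ _ hi,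
        List.getD_eq_getElem _ _ (ht ▸ hi)]
      simp [pvG]
    rw [List.foldl_cons, List.foldl_cons,
      ih _ i (by intro u hu; rw [h1]; exact hlen u (by simp [hu])) (h1 ▸ hi), hzip]

-- trimming the trailing separator off a concatenation is a join (char level)
theorem pvTrim_concat : ∀ (ls : List (List Char)), ls ≠ [] →
    List.take ((ls.map (fun l => l ++ [' ', ' '])).flatten.length - 2)
      (ls.map (fun l => l ++ [' ', ' '])).flatten
    = PySem.Chars.join [' ', ' '] ls := by
  intro ls
  induction ls with
  | nil => intro h; exact absurd rfl h
  | cons x rest ih =>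
    intro _
    cases rest with
    | nil =>
      simp [PySem.Chars.join_singleton, List.take_left (l₁ := x) (l₂ := [' ', ' '])]
    | cons y r =>
      have hflat : ((x :: y :: r).map (fun l => l ++ [' ', ' '])).flatten
          = (x ++ [' ', ' ']) ++ ((y :: r).map (fun l => l ++ [' ', ' '])).flatten := by
        simp
      have hRlen : 2 ≤ ((y :: r).map (fun l => l ++ [' ', ' '])).flatten.length := by
        simp [List.length_flatten]
        omega
      rw [hflat]
      have harith : ((x ++ [' ', ' ']) ++ ((y :: r).map (fun l => l ++ [' ', ' '])).flatten).length - 2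
          = (x ++ [' ', ' ']).length
            + (((y :: r).map (fun l => l ++ [' ', ' '])).flatten.length - 2) := by
        simp only [List.length_append]
        omega
      rw [harith, List.take_append, List.take_of_length_le (by omega), Nat.add_sub_cancel_left,
        ih (by simp), PySem.Chars.join_cons_cons]

-- string-level: fold-append then [:-2]  =  "  ".join
theorem pvToList_foldl_append : ∀ (ps : List String) (a : String),
    (ps.foldl (fun a p => a ++ p ++ "  ") a).toList
      = a.toList ++ (ps.map (fun p => p.toList ++ [' ', ' '])).flatten := by
  intro ps
  induction ps with
  | nil => intro a; simp
  | cons p rest ih =>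
    intro a
    rw [List.foldl_cons, ih]
    simp [String.toList_append]

theorem pvTrim_join (ps : List String) (h : ps ≠ []) :
    PySem.Str.slice (ps.foldl (fun a p => a ++ p ++ "  ") "") none (some (-2))
      = PySem.Str.join "  " ps := by
  rw [← String.toList_inj, PySem.Str.toList_slice, PySem.Chars.slice_eq_listSlice,
    PySem.List.slice_to_neg_ofNat _ 2 (by omega), PySem.Str.toList_join, pvToList_foldl_append]
  have h0 : ("" : String).toList = [] := rfl
  have hsep : ("  " : String).toList = [' ', ' '] := rfl
  rw [h0, List.nil_append, hsep]
  have := pvTrim_concat (ps.map String.toList) (by simpa using h)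
  rw [List.map_map] at this
  exact this

-- the whole of A's digit loop, digit tuple by digit tuple
theorem pvFoldA_eq (lookup : Char → List String) : ∀ (digits : List Char) (init : List String),
    (∀ c ∈ digits, (lookup c).length = init.length) →
    digits.foldl (fun acc c => (PySem.List.enumerate (lookup c)).foldl pvStep acc) init
    = (digits.map lookup).foldl (fun acc t => List.zipWith pvG acc t) init := by
  intro digits
  induction digits with
  | nil => intro init _; rfl
  | cons c cs ih =>
    intro init hlen
    rw [List.map_cons, List.foldl_cons, List.foldl_cons]
    have hinner := pvInner_eq_zipWith (lookup c) 0 init (by simpa using hlen c (by simp))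
    rw [Nat.cast_zero] at hinner
    rw [hinner]
    simp only [List.take_zero, List.drop_zero, List.nil_append]
    exact ih _ (by
      intro u hu
      rw [List.length_zipWith, hlen c (by simp), Nat.min_self]
      exact hlen u (by simp [hu]))

-- A = B, in terms of the digit string, the lookup function and the shared height
theorem pvMain_eq (digits : List Char) (lookup : Char → List String) (h : Nat)
    (hne : digits ≠ []) (hlen : ∀ c ∈ digits, (lookup c).length = h) :
    (digits.foldl (fun acc c => (PySem.List.enumerate (lookup c)).foldl pvStep acc)
        (List.replicate h "")).map (fun line => PySem.Str.slice line none (some (-2)))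
    = (PySem.List.pyRange 0 (h : Int) 1).map (fun i =>
        PySem.Str.join "  " ((digits.map lookup).map (fun t => PySem.List.pyGetD t i ""))) := by
  have hlen' : ∀ c ∈ digits, (lookup c).length = (List.replicate h ("" : String)).length := by
    simpa using hlen
  have hts_len : ∀ t ∈ digits.map lookup, t.length = (List.replicate h ("" : String)).length := by
    intro t ht
    obtain ⟨c, hc, rfl⟩ := List.mem_map.mp ht
    exact hlen' c hc
  rw [pvFoldA_eq lookup digits _ hlen', PySem.List.pyRange_zero_natCast, List.map_map]
  have hout_len : ((digits.map lookup).foldl (fun acc t => List.zipWith pvG acc t)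
      (List.replicate h "")).length = h := by
    rw [pvOuter_len _ _ hts_len]; simp
  apply List.ext_getElem
  · simp [hout_len]
  · intro i hi hi2
    have hih : i < h := by simpa [hout_len] using hi
    rw [List.getElem_map, List.getElem_map, List.getElem_range]
    rw [← List.getD_eq_getElem _ "" (by simpa [hout_len] using hih)]
    rw [pvOuter_get _ _ i hts_len (by simpa using hih)]
    have hinit_get : (List.replicate h ("" : String)).getD i "" = "" := by
      simp
    rw [hinit_get, ← List.foldl_map (f := fun t : List String => t.getD i "")
      (g := fun a p => a ++ p ++ "  ")]
    rw [pvTrim_join _ (by simpa using (by simpa using hne : digits.map lookup ≠ []))]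
    congr 1
    simp only [List.map_map]
    apply List.map_congr_left
    intro c hc
    simp [PySem.List.pyGetD_natCast]

-- ===== VERDICT (by name: the statement is the Claim_ definition above) =====
theorem combine_ascii_numbers_spec : Claim_equal_combine_ascii_numbers := by
  intro number char_sets _ hpre
  obtain ⟨-, -, hall⟩ := hpre
  unfold Spec_combine_ascii_numbers
  have hlen : ∀ c ∈ PySem.Int.toChars number,
      ((fun c : Char => ((PySem.Dict.ofList char_sets).get? ((c.toNat : Int) - 48)).getD []) c).length
        = ((PySem.Dict.ofList char_sets).values.headD []).length := by
    intro c hc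
    have := (List.all_eq_true.mp hall) c hc
    rw [beq_iff_eq] at this
    cases hg : (PySem.Dict.ofList char_sets).get? ((c.toNat : Int) - 48) with
    | none => rw [hg] at this; simp at this
    | some u =>
      rw [hg] at this
      simp only [Option.map_some, Option.some.injEq] at this
      simp [hg, this]
  exact pvMain_eq (PySem.Int.toChars number)
    (fun c => ((PySem.Dict.ofList char_sets).get? ((c.toNat : Int) - 48)).getD [])
    ((PySem.Dict.ofList char_sets).values.headD []).length
    (pvToChars_ne_nil number) hlen
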